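-- pv_equiv track=rewrite | github.com/gallettilance/reproduce-those-animations | 006-hierarchical-clustering/dendrogram_multiscale.py | split_indices_evenly
-- ===== SOURCE A (Python) =====
-- def split_indices_evenly(n_items, n_groups):
--     if n_items <= 0 or n_groups <= 0:
--         return []
--     q, r = divmod(n_items, n_groups)
--     chunks = []
--     i0 = 0
--     for g in range(n_groups):
--         take = q + (1 if g < r else 0)
--         chunks.append((i0, i0 + take))
--         i0 += take
--     return chunks
-- ===== SOURCE B (Python) =====
-- def split_indices_evenly(n_items, n_groups):
--     if n_items <= 0 or n_groups <= 0:
--         return []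
--     q, r = divmod(n_items, n_groups)
--     return [(g * q + min(g, r), (g + 1) * q + min(g + 1, r)) for g in range(n_groups)]
-- ===== Notes on version B (the rewrite author's own statement) =====
-- stated objective: simpler
-- what changed: Replaces the stateful loop threading a running start index i0 with a stateless comprehension computing each group's boundaries in closed form from q and r.
import Mathlib
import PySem

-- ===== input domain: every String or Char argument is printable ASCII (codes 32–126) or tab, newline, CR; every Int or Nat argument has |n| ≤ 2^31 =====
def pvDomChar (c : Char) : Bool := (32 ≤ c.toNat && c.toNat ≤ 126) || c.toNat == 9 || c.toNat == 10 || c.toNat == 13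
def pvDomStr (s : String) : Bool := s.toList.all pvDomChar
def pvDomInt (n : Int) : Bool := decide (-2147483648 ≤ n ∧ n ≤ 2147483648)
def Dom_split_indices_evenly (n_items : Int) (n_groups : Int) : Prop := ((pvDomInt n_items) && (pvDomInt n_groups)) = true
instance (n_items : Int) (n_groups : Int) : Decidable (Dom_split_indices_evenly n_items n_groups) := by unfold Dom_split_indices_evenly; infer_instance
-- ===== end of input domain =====

-- ===== PORT A =====
-- B replaces A's stateful loop (running start index i0) with a stateless closed-form comprehension; objective: simpler.
def split_indices_evenly (n_items : Int) (n_groups : Int) : List (Int × Int) :=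
  if n_items ≤ 0 ∨ n_groups ≤ 0 then []
  else
    -- q, r = divmod(n_items, n_groups), inlined
    ((PySem.List.pyRange 0 n_groups 1).foldl
      (fun (st : List (Int × Int) × Int) g =>
        let take := PySem.Int.floordiv n_items n_groups +
          (if g < PySem.Int.mod n_items n_groups then 1 else 0)
        (st.1 ++ [(st.2, st.2 + take)], st.2 + take)) ([], 0)).1

-- ===== PORT B =====
def split_indices_evenly_alt (n_items : Int) (n_groups : Int) : List (Int × Int) :=
  if n_items ≤ 0 ∨ n_groups ≤ 0 then []
  else
    -- q, r = divmod(n_items, n_groups), inlined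
    (PySem.List.pyRange 0 n_groups 1).map
      (fun g => (g * PySem.Int.floordiv n_items n_groups +
                   min g (PySem.Int.mod n_items n_groups),
                 (g + 1) * PySem.Int.floordiv n_items n_groups +
                   min (g + 1) (PySem.Int.mod n_items n_groups)))

-- ===== PRECONDITION & SPEC =====
def Spec_split_indices_evenly (n_items : Int) (n_groups : Int) (out : List (Int × Int)) : Prop := out = split_indices_evenly_alt n_items n_groups
instance (n_items : Int) (n_groups : Int) (out : List (Int × Int)) : Decidable (Spec_split_indices_evenly n_items n_groups out) := by unfold Spec_split_indices_evenly; infer_instance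

-- ===== CLAIM (what is proved, stated in full; the proofs are below) =====
def Claim_equal_split_indices_evenly : Prop := ∀ (n_items : Int) (n_groups : Int), Dom_split_indices_evenly n_items n_groups → Spec_split_indices_evenly n_items n_groups (split_indices_evenly n_items n_groups)

-- ===== LEMMAS AND PROOFS =====
-- Loop invariant: after g iterations the accumulator holds the closed-form chunks for
-- groups 0..g-1 and the running index i0 equals g*q + min g r.
theorem split_fold_closed (q r : Int) (hr : 0 ≤ r) (n : Nat) :
    ((PySem.List.pyRange 0 (n : Int) 1).foldl
      (fun (st : List (Int × Int) × Int) g =>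
        let take := q + (if g < r then 1 else 0)
        (st.1 ++ [(st.2, st.2 + take)], st.2 + take)) ([], 0)) =
    ((PySem.List.pyRange 0 (n : Int) 1).map
      (fun g => (g * q + min g r, (g + 1) * q + min (g + 1) r)),
      (n : Int) * q + min (n : Int) r) := by
  induction n with
  | zero =>
    simp [PySem.List.pyRange_one_eq_nil]
    omega
  | succ n ih =>
    have h : ((n + 1 : Nat) : Int) = (n : Int) + 1 := by push_cast; ring
    rw [h, PySem.List.pyRange_one_succ_right (by positivity)]
    rw [List.foldl_append, List.map_append, ih]
    simp only [List.foldl_cons, List.foldl_nil, List.map_cons, List.map_nil]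
    by_cases hc : (n : Int) < r
    · have h1 : min ((n : Int) + 1) r = (n : Int) + 1 := by omega
      have h2 : min (n : Int) r = (n : Int) := by omega
      simp only [hc, if_true, h1, h2, Prod.mk.injEq, List.append_cancel_left_eq,
        List.cons.injEq, and_true]
      and_intros <;> first | trivial | ring
    · have h1 : min ((n : Int) + 1) r = r := by omega
      have h2 : min (n : Int) r = r := by omega
      simp only [hc, if_false, h1, h2, Prod.mk.injEq, List.append_cancel_left_eq,
        List.cons.injEq, and_true]
      and_intros <;> first | trivial | ring

-- ===== VERDICT (by name: the statement is the Claim_ definition above) =====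
theorem split_indices_evenly_spec : Claim_equal_split_indices_evenly := by
  intro n_items n_groups _
  unfold Spec_split_indices_evenly split_indices_evenly split_indices_evenly_alt
  split_ifs with h
  · rfl
  · push_neg at h
    have hg : 0 < n_groups := h.2
    have hr : 0 ≤ PySem.Int.mod n_items n_groups := PySem.Int.mod_nonneg _ hg
    obtain ⟨m, rfl⟩ : ∃ m : Nat, n_groups = (m : Int) :=
      ⟨n_groups.toNat, (Int.toNat_of_nonneg hg.le).symm⟩
    rw [split_fold_closed _ _ hr]
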